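-- pv_equiv track=rewrite | github.com/paiml/depyler | examples/functional_programming_combined.py | group_by_property
-- ===== SOURCE A (Python) =====
-- from typing import List, Dict, Tuple, Callable
--
-- def group_by_property(items: List[int], modulo: int) -> Dict[int, List[int]]:
--     """Group items by property (modulo)"""
--     groups: Dict[int, List[int]] = {}
--
--     for item in items:
--         key: int = item % modulo
--
--         if key not in groups:
--             groups[key] = []
--
--         groups[key].append(item)
--
--     return groups
-- ===== SOURCE B (Python) =====
-- def group_by_property(items, modulo):
--     """Group items by property (modulo)"""
--     keys = dict.fromkeys(x % modulo for x in items)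
--     return {k: [x for x in items if x % modulo == k] for k in keys}
-- ===== Notes on version B (the rewrite author's own statement) =====
-- stated objective: simpler
-- what changed: Replaces the single-pass mutable dict-bucketing loop by a two-phase comprehension: collect the distinct keys in first-occurrence order with dict.fromkeys, then build each group with a per-key filter over the items.
import Mathlib
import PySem

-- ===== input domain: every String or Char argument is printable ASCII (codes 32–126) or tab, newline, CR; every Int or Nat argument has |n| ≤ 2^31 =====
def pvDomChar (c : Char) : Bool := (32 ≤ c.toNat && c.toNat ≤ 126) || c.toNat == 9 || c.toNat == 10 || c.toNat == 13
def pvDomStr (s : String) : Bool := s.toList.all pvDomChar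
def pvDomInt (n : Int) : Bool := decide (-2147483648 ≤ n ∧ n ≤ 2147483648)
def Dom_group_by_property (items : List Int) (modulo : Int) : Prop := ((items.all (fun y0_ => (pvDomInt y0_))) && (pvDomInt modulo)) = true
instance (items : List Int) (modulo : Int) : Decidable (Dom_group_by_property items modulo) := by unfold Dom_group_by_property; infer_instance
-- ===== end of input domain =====

-- B replaces the single-pass dict-bucketing loop by dedup of the keys followed by a per-key filter (simpler decomposition, same results).


-- ===== PORT A =====
def group_by_property (items : List Int) (modulo : Int) : List (Int × List Int) :=
  (items.foldl (fun groups item =>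
      let key := PySem.Int.mod item modulo
      let groups := if groups.contains key then groups else groups.insert key []
      groups.modify key [] (fun v => v ++ [item]))
    PySem.Dict.empty).items

-- ===== PORT B =====
def group_by_property_alt (items : List Int) (modulo : Int) : List (Int × List Int) :=
  let keys := PySem.List.dedup (items.map (fun x => PySem.Int.mod x modulo))
  keys.map (fun k => (k, items.filter (fun x => PySem.Int.mod x modulo == k)))

-- ===== PRECONDITION & SPEC =====
-- Pre_ excludes exactly modulo = 0 with non-empty items, where the Python A raises ZeroDivisionError.
def Pre_group_by_property (items : List Int) (modulo : Int) : Prop := modulo ≠ 0 ∨ items = []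
instance (items : List Int) (modulo : Int) : Decidable (Pre_group_by_property items modulo) := by unfold Pre_group_by_property; infer_instance
def pvWitness_group_by_property : List Int × Int := ([3, 1, 4, 1, 5, 9, 2, 6], 3)
def Spec_group_by_property (items : List Int) (modulo : Int) (out : List (Int × List Int)) : Prop := out = group_by_property_alt items modulo
instance (items : List Int) (modulo : Int) (out : List (Int × List Int)) : Decidable (Spec_group_by_property items modulo out) := by unfold Spec_group_by_property; infer_instance

-- ===== CLAIM (what is proved, stated in full; the proofs are below) =====
def Claim_equal_group_by_property : Prop := ∀ (items : List Int) (modulo : Int), Dom_group_by_property items modulo → Pre_group_by_property items modulo → Spec_group_by_property items modulo (group_by_property items modulo)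

-- ===== LEMMAS AND PROOFS =====

-- A's body "if key not in groups: groups[key] = []; groups[key].append(item)" is one `modify`.
theorem gbp_step_eq (d : PySem.Dict Int (List Int)) (item modulo : Int) :
    (let key := PySem.Int.mod item modulo
     let groups := if d.contains key then d else d.insert key []
     groups.modify key [] (fun v => v ++ [item]))
      = d.modify (PySem.Int.mod item modulo) [] (fun v => v ++ [item]) := by
  set k := PySem.Int.mod item modulo with hk
  by_cases h : d.contains k
  · simp [h]
  · have h' : d.contains k = false := by simpa using h
    simp [h', PySem.Dict.modify, PySem.Dict.getD_insert_self,
      PySem.Dict.insert_insert_self, PySem.Dict.getD_of_not_contains]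

theorem gbp_foldl_eq (items : List Int) (modulo : Int) :
    items.foldl (fun groups item =>
        let key := PySem.Int.mod item modulo
        let groups := if groups.contains key then groups else groups.insert key []
        groups.modify key [] (fun v => v ++ [item])) PySem.Dict.empty
      = (items.map (fun x => (PySem.Int.mod x modulo, x))).foldl
          (fun d p => d.modify p.1 [] (fun v => v ++ [p.2])) PySem.Dict.empty := by
  rw [List.foldl_map]
  congr 1
  funext d item
  exact gbp_step_eq d item modulo

-- ===== VERDICT (by name: the statement is the Claim_ definition above) =====
theorem group_by_property_spec : Claim_equal_group_by_property := by
  intro items modulo _ _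
  unfold Spec_group_by_property group_by_property group_by_property_alt
  rw [gbp_foldl_eq]
  set key := fun x : Int => PySem.Int.mod x modulo with hkey
  have hkeys : ((items.map (fun x => (key x, x))).foldl
      (fun d p => d.modify p.1 [] (fun v => v ++ [p.2])) PySem.Dict.empty).keys
      = PySem.List.dedup (items.map key) := by
    rw [PySem.Dict.keys_foldl_modify_key (items.map (fun x => (key x, x))) Prod.fst []
      (fun _ p v => v ++ [p.2]) PySem.Dict.empty]
    simp [PySem.Set.update, PySem.Set.ofList_eq_foldl, List.foldl_map,
      PySem.List.dedup_eq_ofList, PySem.Dict.keys_empty]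
  have hnodup : ((items.map (fun x => (key x, x))).foldl
      (fun d p => d.modify p.1 [] (fun v => v ++ [p.2])) PySem.Dict.empty).keys.Nodup := by
    rw [hkeys]; exact PySem.List.nodup_dedup _
  rw [PySem.Dict.items_eq_map_keys _ hnodup [], hkeys]
  apply List.map_congr_left
  intro k _
  rw [PySem.Dict.getD_foldl_modify_append]
  simp [List.filter_map, List.map_map, Function.comp_def, PySem.Dict.getD_empty, hkey]
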